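-- pv_equiv track=rewrite | github.com/suchot/CS-Notes | docs/offer/爱奇艺/排列计数.py | sortcount
-- ===== SOURCE A (Python) =====
-- def sortcount(n,arr):
--     Mod = 10**9 +7
--     n = len(arr)
--     def dp(i,j):
--         if i==0:
--             return 1
--         elif arr[i-1] ==0:
--             return sum(dp(i-1,k) for k in range(j,i))% Mod
--         else:
--             return sum(dp(i-1,k) for k in range(j)) % Mod
--     return sum(dp(n,j) for j in  range(n+1)) % Mod
-- ===== SOURCE B (Python) =====
-- def sortcount(n, arr):
--     Mod = 10**9 + 7
--     row = [1]
--     for v in arr: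
--         if v == 0:
--             # suffix-sum scan over the previous row (built reversed, then flipped)
--             nxt = [0]
--             s = 0
--             for x in reversed(row):
--                 s += x
--                 nxt.append(s % Mod)
--             nxt.reverse()
--         else:
--             # prefix-sum scan over the previous row
--             nxt = [0]
--             s = 0
--             for x in row:
--                 s += x
--                 nxt.append(s % Mod)
--         row = nxt
--     return sum(row) % Mod
-- ===== Notes on version B (the rewrite author's own statement) =====
-- stated objective: faster
-- what changed: Replaces A's exponential top-down recursion dp(i,j) (recomputed with no memoization) by a bottom-up DP that keeps one row per level and builds the next row with a single prefix-sum or suffix-sum scan.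
import Mathlib
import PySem

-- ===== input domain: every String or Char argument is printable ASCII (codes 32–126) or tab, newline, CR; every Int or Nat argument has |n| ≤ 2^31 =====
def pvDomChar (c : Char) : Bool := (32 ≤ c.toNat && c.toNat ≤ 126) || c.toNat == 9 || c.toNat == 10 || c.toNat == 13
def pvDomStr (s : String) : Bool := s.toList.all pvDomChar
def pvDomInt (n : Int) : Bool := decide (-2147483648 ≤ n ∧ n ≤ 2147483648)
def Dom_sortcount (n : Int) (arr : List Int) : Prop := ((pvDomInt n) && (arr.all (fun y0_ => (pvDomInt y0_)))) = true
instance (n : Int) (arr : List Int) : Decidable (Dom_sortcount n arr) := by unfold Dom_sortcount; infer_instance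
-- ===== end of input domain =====

-- B replaces A's exponential recursion by a bottom-up row DP with prefix/suffix-sum scans (faster, asymptotic).

def pvMod : Int := 10 ^ 9 + 7

-- ===== PORT A =====
-- dp(i,j) of A, structural recursion on i (A only ever calls it with 0 ≤ i ≤ len(arr)).
def dpA (arr : List Int) : Nat → Nat → Int
  | 0, _ => 1
  | i + 1, j =>
    if PySem.List.pyGet? arr (Int.ofNat i) = some 0 then
      (((List.range' j (i + 1 - j)).map (dpA arr i)).sum) % pvMod
    else
      (((List.range j).map (dpA arr i)).sum) % pvMod

def sortcount (n : Int) (arr : List Int) : Int :=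
  (((List.range (arr.length + 1)).map (dpA arr arr.length)).sum) % pvMod

-- ===== PORT B =====
-- one step of Source B's inner scan loop: append the running sum mod pvMod
def pvScanStep (p : List Int × Int) (x : Int) : List Int × Int :=
  (p.1 ++ [(p.2 + x) % pvMod], p.2 + x)

-- one iteration of Source B's `for v in arr` loop
def altStep (row : List Int) (v : Int) : List Int :=
  if v = 0 then ((row.reverse.foldl pvScanStep ([0], 0)).1).reverse
  else (row.foldl pvScanStep ([0], 0)).1

def sortcount_alt (n : Int) (arr : List Int) : Int :=
  ((arr.foldl altStep [1]).sum) % pvMod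

-- ===== PRECONDITION & SPEC =====
def Spec_sortcount (n : Int) (arr : List Int) (out : Int) : Prop := out = sortcount_alt n arr
instance (n : Int) (arr : List Int) (out : Int) : Decidable (Spec_sortcount n arr out) := by unfold Spec_sortcount; infer_instance

-- ===== CLAIM =====
def Claim_equal_sortcount : Prop := ∀ (n : Int) (arr : List Int), Dom_sortcount n arr → Spec_sortcount n arr (sortcount n arr)

-- ===== LEMMAS AND PROOFS =====

-- the dp row of level i: dp(i,j) for j = 0..i
def dpRow (arr : List Int) (i : Nat) : List Int := (List.range (i + 1)).map (dpA arr i)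

theorem scan_spec (xs acc : List Int) (s0 : Int) :
    xs.foldl pvScanStep (acc, s0) =
      (acc ++ (List.range xs.length).map (fun j => (s0 + (xs.take (j + 1)).sum) % pvMod),
       s0 + xs.sum) := by
  induction xs generalizing acc s0 with
  | nil => simp
  | cons x t ih =>
    simp only [List.foldl_cons, pvScanStep, ih, List.length_cons, List.range_succ_eq_map,
      List.map_cons, List.map_map, List.sum_cons, Prod.mk.injEq]
    refine ⟨?_, by ring⟩
    simp [List.append_assoc, Function.comp, List.take_succ_cons, add_assoc]

theorem step_spec (arr : List Int) (i : Nat) (v : Int) (h : arr[i]? = some v) :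
    altStep (dpRow arr i) v = dpRow arr (i + 1) := by
  have hlen : (dpRow arr i).length = i + 1 := by simp [dpRow]
  by_cases hv : v = 0
  · -- suffix-sum branch
    subst hv
    have hlenr : (dpRow arr i).reverse.length = i + 1 := by simp [hlen]
    simp only [altStep, scan_spec, hlenr]
    rw [if_true, List.reverse_append, List.reverse_singleton]
    have hrhs : dpRow arr (i + 1)
        = (List.range (i + 1)).map (dpA arr (i + 1)) ++ [dpA arr (i + 1) (i + 1)] := by
      simp [dpRow, List.range_succ]
    have hlast : dpA arr (i + 1) (i + 1) = 0 := by
      simp [dpA, h]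
    rw [hrhs, hlast]
    congr 1
    have hrev : (List.range (i + 1)).reverse = (List.range (i + 1)).map (fun x => i - x) := by
      simp only [List.range_eq_range', List.reverse_range']
      apply List.map_congr_left
      intro a _
      omega
    rw [← List.map_reverse, hrev, List.map_map]
    apply List.map_congr_left
    intro j hj
    simp only [List.mem_range] at hj
    simp only [Function.comp_apply]
    have e2 : (dpRow arr i).reverse.take (i - j + 1) = ((dpRow arr i).drop j).reverse := by
      rw [List.take_reverse]
      congr 1
      rw [hlen]
      congr 1
      omega
    rw [e2, List.sum_reverse]
    have e3 : (dpRow arr i).drop j = (List.range' j (i + 1 - j)).map (dpA arr i) := by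
      unfold dpRow
      rw [← List.map_drop, List.range_eq_range', List.drop_range']
      simp
    rw [e3]
    simp [dpA, h]
  · -- prefix-sum branch
    simp only [altStep, if_neg hv, scan_spec, hlen]
    have hrhs : dpRow arr (i + 1)
        = dpA arr (i + 1) 0 :: (List.range (i + 1)).map (dpA arr (i + 1) ∘ Nat.succ) := by
      simp [dpRow, List.range_succ_eq_map]
    have h0 : dpA arr (i + 1) 0 = 0 := by
      simp [dpA, h, hv]
    rw [hrhs, h0, List.singleton_append]
    congr 1
    apply List.map_congr_left
    intro j hj
    simp only [List.mem_range] at hj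
    simp only [Function.comp_apply]
    have e1 : (dpRow arr i).take (j + 1) = (List.range (j + 1)).map (dpA arr i) := by
      unfold dpRow
      rw [← List.map_take, List.take_range, Nat.min_eq_left (by omega : j + 1 ≤ i + 1)]
    rw [e1]
    simp [dpA, h, hv]

theorem inv_spec : ∀ (suf pre : List Int),
    List.foldl altStep (dpRow (pre ++ suf) pre.length) suf
      = dpRow (pre ++ suf) (pre ++ suf).length := by
  intro suf
  induction suf with
  | nil => intro pre; simp
  | cons v s ih =>
    intro pre
    have hget : (pre ++ v :: s)[pre.length]? = some v := by
      simp
    rw [List.foldl_cons, step_spec _ _ _ hget]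
    have harr : pre ++ v :: s = (pre ++ [v]) ++ s := by simp
    have hlen : pre.length + 1 = (pre ++ [v]).length := by simp
    rw [harr, hlen, ih (pre ++ [v])]

-- ===== VERDICT =====
theorem sortcount_spec : Claim_equal_sortcount := by
  intro n arr _
  unfold Spec_sortcount sortcount sortcount_alt
  have h0 : dpRow arr 0 = [1] := by simp [dpRow, dpA]
  have := inv_spec arr []
  simp only [List.nil_append, List.length_nil] at this
  rw [← h0, this]
  rfl
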